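-- pv_equiv track=rewrite | github.com/israelnan/Boogle | boggle_utils.py | find_max_path
-- ===== SOURCE A (Python) =====
-- def find_max_path(path_list, word):
--     max_path = []
--     for path in path_list:
--         if len(path) == len(word):
--             return path
--         if len(path) > len(max_path):
--             max_path = path
--     return max_path
-- ===== SOURCE B (Python) =====
-- def find_max_path(path_list, word):
--     m = next((p for p in path_list if len(p) == len(word)), None)
--     if m is not None:
--         return m
--     return max(path_list, key=len, default=[])
-- ===== Notes on version B (the rewrite author's own statement) =====
-- stated objective: simpler
-- what changed: Replaces the interleaved loop (early return on exact length + running max accumulator) with two separated concerns: a generator search for the first exact-length path, else max(path_list, key=len, default=[]).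
import Mathlib
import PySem

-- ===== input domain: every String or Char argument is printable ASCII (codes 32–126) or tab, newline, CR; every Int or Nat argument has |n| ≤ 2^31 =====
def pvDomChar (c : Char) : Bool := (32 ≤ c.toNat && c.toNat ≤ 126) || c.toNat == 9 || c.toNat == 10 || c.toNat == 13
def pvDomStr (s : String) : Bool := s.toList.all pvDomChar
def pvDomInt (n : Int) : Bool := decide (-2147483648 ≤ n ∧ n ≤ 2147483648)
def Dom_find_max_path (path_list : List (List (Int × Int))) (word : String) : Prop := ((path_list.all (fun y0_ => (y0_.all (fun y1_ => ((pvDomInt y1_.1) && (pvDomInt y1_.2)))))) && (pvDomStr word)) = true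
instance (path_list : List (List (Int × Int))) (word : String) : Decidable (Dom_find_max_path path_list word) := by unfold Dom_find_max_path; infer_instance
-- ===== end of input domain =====

-- B separates the two concerns: first exact-length match (find?), else first-longest path (max? with default []) — simpler, same O(n) cost.


-- ===== PORT A =====
-- loop with early return on exact length and a running max accumulator
def findMaxGo (n : Nat) : List (List (Int × Int)) → List (Int × Int) → List (Int × Int)
  | [], max_path => max_path
  | path :: rest, max_path =>
      if path.length = n then path
      else if path.length > max_path.length then findMaxGo n rest path
      else findMaxGo n rest max_path

def find_max_path (path_list : List (List (Int × Int))) (word : String) : List (Int × Int) :=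
  findMaxGo word.toList.length path_list []

-- ===== PORT B =====
def find_max_path_alt (path_list : List (List (Int × Int))) (word : String) : List (Int × Int) :=
  match path_list.find? (fun p => p.length == word.toList.length) with
  | some p => p
  | none => (PySem.List.max? path_list (fun p => p.length)).getD []

-- ===== PRECONDITION & SPEC =====
def Spec_find_max_path (path_list : List (List (Int × Int))) (word : String) (out : List (Int × Int)) : Prop := out = find_max_path_alt path_list word
instance (path_list : List (List (Int × Int))) (word : String) (out : List (Int × Int)) : Decidable (Spec_find_max_path path_list word out) := by unfold Spec_find_max_path; infer_instance

-- ===== CLAIM (what is proved, stated in full; the proofs are below) =====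
def Claim_equal_find_max_path : Prop := ∀ (path_list : List (List (Int × Int))) (word : String), Dom_find_max_path path_list word → Spec_find_max_path path_list word (find_max_path path_list word)

-- ===== LEMMAS AND PROOFS =====

-- A's loop returns the first exact-length path if one exists
theorem findMaxGo_find_some (n : Nat) (pl : List (List (Int × Int))) (p acc : List (Int × Int))
    (h : pl.find? (fun q => q.length == n) = some p) : findMaxGo n pl acc = p := by
  induction pl generalizing acc with
  | nil => simp at h
  | cons q rest ih =>
      by_cases hq : q.length = n
      · rw [List.find?_cons_of_pos (by simpa using hq)] at h
        simp only [Option.some_inj] at h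
        simp only [findMaxGo, if_pos hq]
        exact h
      · rw [List.find?_cons_of_neg (by simpa using hq)] at h
        simp only [findMaxGo, if_neg hq]
        split <;> exact ih _ h

-- with no exact-length path, A's loop is the plain running-max fold
theorem findMaxGo_find_none (n : Nat) (pl : List (List (Int × Int))) (acc : List (Int × Int))
    (h : pl.find? (fun q => q.length == n) = none) :
    findMaxGo n pl acc = pl.foldl (fun m x => if m.length < x.length then x else m) acc := by
  induction pl generalizing acc with
  | nil => simp [findMaxGo]
  | cons q rest ih =>
      rw [List.find?_eq_none] at h
      have hq : ¬ q.length = n := by simpa using h q (List.mem_cons_self ..)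
      have hrest : rest.find? (fun q => q.length == n) = none :=
        List.find?_eq_none.mpr (fun x hx => h x (List.mem_cons_of_mem _ hx))
      simp only [findMaxGo, if_neg hq, gt_iff_lt, List.foldl_cons]
      by_cases hcmp : acc.length < q.length
      · simp only [if_pos hcmp]; exact ih _ hrest
      · simp only [if_neg hcmp]; exact ih _ hrest

-- max(·, key=len) over a nonempty list is the plain first-max fold
theorem max?_cons_eq (q : List (Int × Int)) (rest : List (List (Int × Int))) :
    PySem.List.max? (q :: rest) (fun p => p.length)
      = some (rest.foldl (fun m x => if m.length < x.length then x else m) q) := by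
  induction rest generalizing q with
  | nil => rfl
  | cons r t ih =>
      rw [List.foldl_cons]
      by_cases h : q.length < r.length
      · rw [if_pos h, ← ih r]
        simp [PySem.List.max?, h]
      · rw [if_neg h, ← ih q]
        simp [PySem.List.max?, h]

-- ===== VERDICT (by name: the statement is the Claim_ definition above) =====
theorem find_max_path_spec : Claim_equal_find_max_path := by
  intro pl word _
  unfold Spec_find_max_path find_max_path find_max_path_alt
  cases hF : pl.find? (fun q => q.length == word.toList.length) with
  | some p => exact findMaxGo_find_some _ _ _ _ hF
  | none =>
      cases pl with
      | nil => rfl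
      | cons q rest =>
          show findMaxGo word.toList.length (q :: rest) []
              = (PySem.List.max? (q :: rest) (fun p => p.length)).getD []
          rw [max?_cons_eq, Option.getD_some, findMaxGo_find_none _ _ _ hF, List.foldl_cons]
          by_cases h0 : ([] : List (Int × Int)).length < q.length
          · rw [if_pos h0]
          · rw [if_neg h0]
            have hq0 : q = [] := by
              cases q with
              | nil => rfl
              | cons a t => simp at h0
            rw [hq0]
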